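-- pv_equiv track=rewrite | github.com/sy1Y/Shaoyue_Yang_cs526 | Midterm Exam/Q4_game.py | valid_unit
-- ===== SOURCE A (Python) =====
-- def valid_unit(unit, symbols):
--     new_symbols = set()
--     for cell in unit:
--         if cell != '.': #ignore '.'
--             if cell in new_symbols:  #Symbols repeat
--                 return False
--             if cell not in symbols:  #Check undefined symbols
--                 return False
--             new_symbols.add(cell) #First appearance,add
--     return True
-- ===== SOURCE B (Python) =====
-- def valid_unit(unit, symbols):
--     if not unit:
--         return True
--     head, rest = unit[0], unit[1:]
--     if head != '.' and (head not in symbols or head in rest):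
--         return False
--     return valid_unit(rest, symbols)
-- ===== Notes on version B (the rewrite author's own statement) =====
-- stated objective: alternative
-- what changed: Replaces the iterative loop with a running seen-set by structural recursion with NO auxiliary set: each non-'.' head is checked for membership in symbols and duplicates are detected by a look-ahead scan of the remaining tail.
import Mathlib
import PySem

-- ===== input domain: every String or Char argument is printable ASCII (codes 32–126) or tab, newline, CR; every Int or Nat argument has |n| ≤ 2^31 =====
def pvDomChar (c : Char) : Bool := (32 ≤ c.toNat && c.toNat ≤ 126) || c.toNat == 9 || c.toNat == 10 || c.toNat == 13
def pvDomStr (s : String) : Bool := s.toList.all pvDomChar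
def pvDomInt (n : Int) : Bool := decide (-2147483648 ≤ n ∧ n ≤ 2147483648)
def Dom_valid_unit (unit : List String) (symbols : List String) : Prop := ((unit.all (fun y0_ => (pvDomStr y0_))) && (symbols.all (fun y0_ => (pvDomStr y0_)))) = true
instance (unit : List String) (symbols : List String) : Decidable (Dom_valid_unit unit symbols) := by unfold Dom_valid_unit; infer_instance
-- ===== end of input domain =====

-- B replaces A's single-pass loop with a running seen-set by structural recursion
-- with no auxiliary set: duplicates are detected by a look-ahead scan of the tail;
-- objective: alternative (similar cost, different mechanism).

-- ===== PORT A =====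
-- the for-loop over unit with its running set new_symbols and early returns
def validUnitLoop (symbols : List String) : List String → PySem.Set String → Bool
  | [], _ => true
  | cell :: rest, new_symbols =>
    if cell ≠ "." then
      if PySem.Set.contains new_symbols cell then false
      else if !symbols.contains cell then false
      else validUnitLoop symbols rest (PySem.Set.add new_symbols cell)
    else validUnitLoop symbols rest new_symbols

def valid_unit (unit : List String) (symbols : List String) : Bool :=
  validUnitLoop symbols unit PySem.Set.empty

-- ===== PORT B =====
def valid_unit_alt (unit : List String) (symbols : List String) : Bool :=
  match unit with
  | [] => true
  | head :: rest =>
    if head ≠ "." ∧ (head ∉ symbols ∨ head ∈ rest) then false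
    else valid_unit_alt rest symbols

-- ===== PRECONDITION & SPEC =====
def Spec_valid_unit (unit : List String) (symbols : List String) (out : Bool) : Prop := out = valid_unit_alt unit symbols
instance (unit : List String) (symbols : List String) (out : Bool) : Decidable (Spec_valid_unit unit symbols out) := by unfold Spec_valid_unit; infer_instance

-- ===== CLAIM (what is proved, stated in full; the proofs are below) =====
def Claim_equal_valid_unit : Prop := ∀ (unit : List String) (symbols : List String), Dom_valid_unit unit symbols → Spec_valid_unit unit symbols (valid_unit unit symbols)

-- ===== LEMMAS AND PROOFS =====

theorem mem_set_add {s : PySem.Set String} {x y : String} :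
    y ∈ PySem.Set.add s x ↔ y ∈ s ∨ y = x := by
  by_cases h : x ∈ s
  · simp only [PySem.Set.add, PySem.Set.contains, List.contains_iff_mem, h, if_pos]
    constructor
    · exact Or.inl
    · rintro (hy | rfl) <;> [exact hy; exact h]
  · simp [PySem.Set.add, h]

theorem contains_eq_true_iff {s : PySem.Set String} {x : String} :
    PySem.Set.contains s x = true ↔ x ∈ s := by
  simp [PySem.Set.contains]

-- A's loop is true iff every filtered cell is in symbols, none is already seen,
-- and the filtered cells are pairwise distinct.
theorem loop_iff (symbols : List String) (unit : List String) (seen : PySem.Set String) :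
    validUnitLoop symbols unit seen = true ↔
      ((∀ c ∈ unit.filter (fun c => c ≠ "."), symbols.contains c = true ∧ c ∉ seen) ∧
        (unit.filter (fun c => c ≠ ".")).Nodup) := by
  induction unit generalizing seen with
  | nil => simp [validUnitLoop]
  | cons cell rest ih =>
    by_cases hdot : cell = "."
    · simpa [validUnitLoop, hdot] using ih seen
    · have hfc : (cell :: rest).filter (fun c => decide (c ≠ ".")) =
        cell :: rest.filter (fun c => decide (c ≠ ".")) :=
      List.filter_cons_of_pos (by simp [hdot])
      show (if cell ≠ "." then _ else _) = true ↔ _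
      rw [if_pos hdot, hfc]
      by_cases hseen : cell ∈ seen
      · rw [if_pos (contains_eq_true_iff.mpr hseen)]
        constructor
        · intro h; exact absurd h (by simp)
        · rintro ⟨h1, _⟩
          exact absurd hseen ((h1 cell (List.mem_cons_self ..)).2)
      · have hc : PySem.Set.contains seen cell = false := by
          rw [Bool.eq_false_iff]; exact fun h => hseen (contains_eq_true_iff.mp h)
        rw [if_neg (by simpa using hseen)]
        by_cases hsym : symbols.contains cell = true
        · rw [if_neg (by simpa using hsym), ih]
          constructor
          · rintro ⟨h1, h2⟩
            have hnotF : cell ∉ rest.filter (fun c => decide (c ≠ ".")) := fun hm =>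
              (h1 cell hm).2 (mem_set_add.mpr (Or.inr rfl))
            refine ⟨?_, List.nodup_cons.mpr ⟨hnotF, h2⟩⟩
            intro c hc'
            rcases List.mem_cons.mp hc' with rfl | hm
            · exact ⟨hsym, hseen⟩
            · obtain ⟨hs, hn⟩ := h1 c hm
              exact ⟨hs, fun hmem => hn (mem_set_add.mpr (Or.inl hmem))⟩
          · rintro ⟨h1, h2⟩
            obtain ⟨hh, ht⟩ := List.nodup_cons.mp h2
            refine ⟨fun c hm => ?_, ht⟩
            obtain ⟨hs, hn⟩ := h1 c (List.mem_cons.mpr (Or.inr hm))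
            refine ⟨hs, fun hmem => ?_⟩
            rcases mem_set_add.mp hmem with h | rfl
            · exact hn h
            · exact hh hm
        · rw [if_pos (by simpa using hsym)]
          constructor
          · intro h; exact absurd h (by simp)
          · rintro ⟨h1, _⟩
            exact absurd ((h1 cell (List.mem_cons_self ..)).1) hsym

-- B is true iff every filtered cell is in symbols and the filtered cells are distinct.
theorem alt_iff (unit : List String) (symbols : List String) :
    valid_unit_alt unit symbols = true ↔
      ((∀ c ∈ unit.filter (fun c => c ≠ "."), symbols.contains c = true) ∧
        (unit.filter (fun c => c ≠ ".")).Nodup) := by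
  induction unit with
  | nil => simp [valid_unit_alt]
  | cons head rest ih =>
    by_cases hdot : head = "."
    · simpa [valid_unit_alt, hdot] using ih
    · have hfc : (head :: rest).filter (fun c => decide (c ≠ ".")) =
        head :: rest.filter (fun c => decide (c ≠ ".")) :=
      List.filter_cons_of_pos (by simp [hdot])
      have hmf : head ∈ rest.filter (fun c => decide (c ≠ ".")) ↔ head ∈ rest := by
        simp [List.mem_filter, hdot]
      rw [valid_unit_alt, hfc]
      by_cases hbad : head ∉ symbols ∨ head ∈ rest
      · rw [if_pos ⟨hdot, hbad⟩]
        constructor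
        · intro h; exact absurd h (by simp)
        · rintro ⟨h1, h2⟩
          rcases hbad with h | h
          · exact (h (by simpa using h1 head (List.mem_cons_self ..))).elim
          · exact ((List.nodup_cons.mp h2).1 (hmf.mpr h)).elim
      · push Not at hbad
        obtain ⟨hsym, hnr⟩ := hbad
        rw [if_neg (by tauto), ih]
        constructor
        · rintro ⟨h1, h2⟩
          refine ⟨fun c hm => ?_, List.nodup_cons.mpr ⟨fun hm => hnr (hmf.mp hm), h2⟩⟩
          rcases List.mem_cons.mp hm with rfl | hm
          · simpa using hsym
          · exact h1 c hm
        · rintro ⟨h1, h2⟩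
          exact ⟨fun c hm => h1 c (List.mem_cons.mpr (Or.inr hm)),
            (List.nodup_cons.mp h2).2⟩

-- ===== VERDICT (by name: the statement is the Claim_ definition above) =====
theorem valid_unit_spec : Claim_equal_valid_unit := by
  intro unit symbols _
  unfold Spec_valid_unit valid_unit
  rw [Bool.eq_iff_iff, loop_iff, alt_iff]
  simp only [PySem.Set.empty, List.not_mem_nil, not_false_iff, and_true]
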